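-- pv_equiv track=rewrite | github.com/grateful-dead-live/recordings_alignment | align1.py | find_dupes
-- ===== SOURCE A (Python) =====
-- from collections import Counter
--
-- def find_dupes(subs):
--     dupes = []
--     for s in subs:
--         if len(list(s.values())[0]) > 0:
--             dupes = [ x[0] for x in list(s.values())[0] ]
--     newDict = dict(filter(lambda e: e[1] > 1, dict(Counter(dupes)).items()))
--     if newDict:
--         return newDict
-- ===== SOURCE B (Python) =====
-- def find_dupes(subs):
--     keys = []
--     for s in reversed(subs):
--         vals = next(iter(s.values()))
--         if vals:
--             keys = [p[0] for p in vals]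
--             break
--     # peel off one distinct value at a time: count and remove the head, recurse on the rest
--     result = []
--     xs = keys
--     while xs:
--         head = xs[0]
--         rest = [y for y in xs[1:] if y != head]
--         extra = len(xs) - 1 - len(rest)
--         if extra:
--             result.append((head, extra + 1))
--         xs = rest
--     if result:
--         return dict(result)
-- ===== Notes on version B (the rewrite author's own statement) =====
-- stated objective: alternative
-- what changed: B picks the last usable sub by a backward scan with early exit instead of A's full forward fold, and replaces Counter+filter+dict rebuild by a peel-off loop that repeatedly counts and removes all copies of the current head, emitting (value,count) pairs in first-occurrence order with no counter structure at all.
import Mathlib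
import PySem

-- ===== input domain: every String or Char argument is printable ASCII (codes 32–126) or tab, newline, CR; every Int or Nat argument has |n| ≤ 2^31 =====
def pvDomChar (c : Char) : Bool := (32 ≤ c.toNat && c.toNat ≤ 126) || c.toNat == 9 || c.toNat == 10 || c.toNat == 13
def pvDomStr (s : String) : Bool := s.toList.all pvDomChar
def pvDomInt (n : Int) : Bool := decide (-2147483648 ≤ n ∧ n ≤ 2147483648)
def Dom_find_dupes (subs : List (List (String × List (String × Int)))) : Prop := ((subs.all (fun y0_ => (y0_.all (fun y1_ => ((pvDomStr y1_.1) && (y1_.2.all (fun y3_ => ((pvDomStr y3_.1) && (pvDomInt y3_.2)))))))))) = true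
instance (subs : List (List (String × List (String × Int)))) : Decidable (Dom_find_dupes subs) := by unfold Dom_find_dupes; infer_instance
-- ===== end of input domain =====

-- B scans subs backwards with early exit instead of A's full forward fold, and builds the duplicate
-- pairs by a peel-off loop (count and remove all copies of the head) instead of Counter + filter
-- (objective: alternative).

-- ===== PORT A =====
-- dupes = [] ; for s in subs: if len(list(s.values())[0]) > 0: dupes = [x[0] for x in list(s.values())[0]]
-- (list(s.values())[0] raises IndexError on an empty dict s; such inputs are excluded by Pre_, and
--  'headD []' is exact on the nonempty dicts Pre_ admits)
def find_dupes (subs : List (List (String × List (String × Int)))) : Option (List (String × Int)) :=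
  let dupes : List String := subs.foldl (fun dupes s =>
    if ((s.map Prod.snd).headD []).length > 0 then
      ((s.map Prod.snd).headD []).map Prod.fst
    else dupes) []
  -- newDict = dict(filter(lambda e: e[1] > 1, dict(Counter(dupes)).items()))
  let newDict : List (String × Int) :=
    (PySem.Dict.counter dupes).items.filter (fun e => decide (e.2 > 1))
  if newDict.isEmpty then none else some newDict

-- ===== PORT B =====
-- for s in reversed(subs): vals = next(iter(s.values())); if vals: keys = [...]; break
-- (next(iter(s.values())) raises StopIteration on an empty dict s; excluded by Pre_)
def altPick : List (List (String × List (String × Int))) → List String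
  | [] => []
  | s :: rest =>
    let vals := (s.map Prod.snd).headD []
    if vals.length > 0 then vals.map Prod.fst else altPick rest

-- while xs: head = xs[0]; rest = [y for y in xs[1:] if y != head];
--           extra = len(xs)-1-len(rest); if extra: result.append((head, extra+1)); xs = rest
def altPeel (xs : List String) : List (String × Int) :=
  match xs with
  | [] => []
  | head :: t =>
    let rest := t.filter (fun y => y ≠ head)
    let extra := t.length - rest.length
    (if extra > 0 then [(head, (extra : Int) + 1)] else []) ++ altPeel rest
termination_by xs.length
decreasing_by
  simpa using Nat.lt_succ_of_le (le_trans (List.length_filter_le _ t.attach) (le_of_eq List.length_attach))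

def find_dupes_alt (subs : List (List (String × List (String × Int)))) : Option (List (String × Int)) :=
  let pairs := altPeel (altPick subs.reverse)
  -- result's keys are pairwise distinct (each head is removed from the rest before recursing),
  -- so dict(result) is the association list 'pairs' itself
  if pairs.isEmpty then none else some pairs

-- ===== PRECONDITION & SPEC =====
-- Pre_ excludes inputs containing an empty dict, on which A raises IndexError at list(s.values())[0].
def Pre_find_dupes (subs : List (List (String × List (String × Int)))) : Prop :=
  ∀ s ∈ subs, s ≠ []
instance (subs : List (List (String × List (String × Int)))) : Decidable (Pre_find_dupes subs) := by unfold Pre_find_dupes; infer_instance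

def pvWitness_find_dupes : (List (List (String × List (String × Int)))) :=
  [[("a", [("x", 1), ("x", 2), ("y", 3)])]]

def Spec_find_dupes (subs : List (List (String × List (String × Int)))) (out : Option (List (String × Int))) : Prop := out = find_dupes_alt subs
instance (subs : List (List (String × List (String × Int)))) (out : Option (List (String × Int))) : Decidable (Spec_find_dupes subs out) := by unfold Spec_find_dupes; infer_instance

-- ===== CLAIM (what is proved, stated in full; the proofs are below) =====
def Claim_equal_find_dupes : Prop := ∀ (subs : List (List (String × List (String × Int)))), Dom_find_dupes subs → Pre_find_dupes subs → Spec_find_dupes subs (find_dupes subs)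

-- ===== LEMMAS AND PROOFS =====

-- A's forward "keep the last usable sub" fold equals B's backward first-match scan.
theorem foldl_eq_altPick (l : List (List (String × List (String × Int)))) :
    ∀ acc : List String,
      l.foldl (fun dupes s =>
        if ((s.map Prod.snd).headD []).length > 0 then
          ((s.map Prod.snd).headD []).map Prod.fst
        else dupes) acc
      = if altPick l.reverse = [] then acc else altPick l.reverse := by
  induction l using List.reverseRecOn with
  | nil => intro acc; simp [altPick]
  | append_singleton l s ih =>
    intro acc
    rw [List.foldl_append, ih, List.reverse_append]
    simp only [List.reverse_cons, List.reverse_nil, List.nil_append, List.singleton_append,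
      List.foldl_cons, List.foldl_nil]
    by_cases hg : ((s.map Prod.snd).headD []).length > 0
    · have hne : ((s.map Prod.snd).headD []).map Prod.fst ≠ [] := by
        intro hh
        have h0 := congrArg List.length hh
        simp only [List.length_map, List.length_nil] at h0
        omega
      rw [if_pos hg,
        show altPick (s :: l.reverse) = ((s.map Prod.snd).headD []).map Prod.fst from by
          simp only [altPick]; rw [if_pos hg],
        if_neg hne]
    · rw [if_neg hg,
        show altPick (s :: l.reverse) = altPick l.reverse from by
          simp only [altPick]; rw [if_neg hg]]

-- PySem.Set.add on x :: s behaves like x :: (add on s) when the added element differs from x.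
theorem set_add_cons (x y : String) (s : List String) (h : y ≠ x) :
    PySem.Set.add (x :: s) y = x :: PySem.Set.add s y := by
  simp only [PySem.Set.add, PySem.Set.contains]
  simp [h]
  split <;> rfl

theorem foldl_add_cons (l : List String) :
    ∀ (s : List String) (x : String), x ∉ l →
      l.foldl PySem.Set.add (x :: s) = x :: l.foldl PySem.Set.add s := by
  induction l with
  | nil => intro s x _; rfl
  | cons y t ih =>
    intro s x hx
    have hyx : y ≠ x := fun hh => hx (hh ▸ List.mem_cons_self)
    simp only [List.foldl_cons, set_add_cons x y s hyx]
    exact ih _ x (fun hm => hx (List.mem_cons_of_mem _ hm))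

-- folding add over l with x already present equals folding over l with the x's removed
theorem foldl_add_filter (x : String) (l : List String) :
    ∀ s : List String, x ∈ s →
      (l.filter (fun y => y ≠ x)).foldl PySem.Set.add s = l.foldl PySem.Set.add s := by
  induction l with
  | nil => intro s _; rfl
  | cons y t ih =>
    intro s hx
    by_cases hy : y = x
    · subst hy
      have : PySem.Set.add s y = s := by simp [PySem.Set.add, PySem.Set.contains, hx]
      simp only [List.filter_cons, decide_eq_true_eq]
      rw [if_neg (by simp), List.foldl_cons, this]
      exact ih s hx
    · simp only [List.filter_cons, decide_eq_true_eq]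
      rw [if_pos hy, List.foldl_cons, List.foldl_cons]
      apply ih
      simp [PySem.Set.add, PySem.Set.contains]
      split <;> simp_all
  
-- first-occurrence set of x :: t = x followed by the set of t with the x's removed
theorem ofList_cons_filter (x : String) (t : List String) :
    PySem.Set.ofList (x :: t) = x :: PySem.Set.ofList (t.filter (fun y => y ≠ x)) := by
  have h1 : PySem.Set.ofList (x :: t) = t.foldl PySem.Set.add [x] := by
    rw [PySem.Set.ofList_eq_foldl]; rfl
  have h2 : PySem.Set.ofList (t.filter (fun y => y ≠ x))
      = (t.filter (fun y => y ≠ x)).foldl PySem.Set.add [] := PySem.Set.ofList_eq_foldl _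
  have hx : x ∉ t.filter (fun y => y ≠ x) := by simp
  rw [h1, ← foldl_add_filter x t [x] (List.mem_singleton.mpr rfl), h2]
  exact foldl_add_cons (t.filter (fun y => y ≠ x)) [] x hx

-- unfolding equation of altPeel on a cons, with the lets substituted
theorem altPeel_cons (head : String) (t : List String) :
    altPeel (head :: t) =
      (if t.length - (t.filter (fun y => y ≠ head)).length > 0 then
        [(head, ((t.length - (t.filter (fun y => y ≠ head)).length : Nat) : Int) + 1)]
      else []) ++ altPeel (t.filter (fun y => y ≠ head)) := by
  rw [altPeel.eq_def]

theorem altPeel_nil : altPeel [] = [] := by rw [altPeel.eq_def]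

theorem length_filter_add_count (head : String) (t : List String) :
    (t.filter (fun y => y ≠ head)).length + t.count head = t.length := by
  induction t with
  | nil => simp
  | cons a t ih =>
    simp only [List.filter_cons, List.count_cons]
    by_cases h : a = head
    · subst h
      simp only [decide_not] at ih ⊢
      simp at ih ⊢
      omega
    · simp only [decide_not] at ih ⊢
      simp [h] at ih ⊢
      omega

-- B's peel-off loop computes exactly the filtered counter items in first-occurrence order.
theorem altPeel_eq_aux (n : Nat) : ∀ (xs : List String), xs.length ≤ n →
    altPeel xs = ((PySem.Set.ofList xs).map (fun k => (k, (xs.count k : Int)))).filter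
        (fun e => decide (e.2 > 1)) := by
  induction n with
  | zero =>
    intro xs h
    have : xs = [] := List.eq_nil_of_length_eq_zero (Nat.le_zero.mp h)
    subst this; rw [altPeel_nil]; rfl
  | succ n ih =>
    intro xs h
    match xs with
    | [] => rw [altPeel_nil]; rfl
    | head :: t =>
      have hrl : (t.filter (fun y => y ≠ head)).length ≤ n := by
        have := List.length_filter_le (fun y => decide (y ≠ head)) t
        simp only [List.length_cons] at h
        omega
      have hkey := length_filter_add_count head t
      rw [altPeel_cons, ih _ hrl, ofList_cons_filter]
      simp only [List.map_cons, List.filter_cons]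
      have hhead_count : ((head :: t).count head : Int)
          = ((t.length - (t.filter (fun y => y ≠ head)).length : Nat) : Int) + 1 := by
        rw [List.count_cons_self]
        have h2 : t.length - (t.filter (fun y => y ≠ head)).length = t.count head := by omega
        rw [h2]
        push_cast
        ring
      have hmap : (PySem.Set.ofList (t.filter (fun y => y ≠ head))).map
            (fun k => (k, ((head :: t).count k : Int)))
          = (PySem.Set.ofList (t.filter (fun y => y ≠ head))).map
            (fun k => (k, ((t.filter (fun y => y ≠ head)).count k : Int))) := by
        apply List.map_congr_left
        intro k hk
        have hk' : k ∈ t.filter (fun y => y ≠ head) := (PySem.Set.mem_ofList _ _).mp hk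
        have hkh : k ≠ head := by
          have := List.of_mem_filter hk'
          simpa using this
        have hkt : (t.filter (fun y => y ≠ head)).count k = t.count k :=
          List.count_filter (by simp [hkh])
        simp [hkh, Ne.symm hkh]
      by_cases hx : t.length - (t.filter (fun y => y ≠ head)).length > 0
      · rw [if_pos hx]
        have hd : decide ((((head :: t).count head : Int)) > 1) = true := by
          rw [hhead_count]; apply decide_eq_true; omega
        rw [hd]
        simp only [hhead_count, hmap]
        rfl
      · rw [if_neg hx]
        have hd : decide ((((head :: t).count head : Int)) > 1) = false := by
          rw [hhead_count]; apply decide_eq_false; omega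
        rw [hd]
        simp only [hmap]
        rfl

theorem altPeel_eq (xs : List String) :
    altPeel xs = ((PySem.Set.ofList xs).map (fun k => (k, (xs.count k : Int)))).filter
        (fun e => decide (e.2 > 1)) :=
  altPeel_eq_aux xs.length xs le_rfl

-- ===== VERDICT (by name: the statement is the Claim_ definition above) =====
theorem find_dupes_spec : Claim_equal_find_dupes := by
  intro subs _ _
  show find_dupes subs = find_dupes_alt subs
  simp only [find_dupes, find_dupes_alt]
  rw [foldl_eq_altPick]
  have h1 : (if altPick subs.reverse = [] then ([] : List String)
      else altPick subs.reverse) = altPick subs.reverse := by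
    split <;> simp_all
  rw [h1, PySem.Dict.items_counter, ← altPeel_eq]
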